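-- pv_equiv track=rewrite | github.com/ministryofjustice/technical-risk-measures-spreadsheet | manager/helpers.py | split_cell_string
-- ===== SOURCE A (Python) =====
-- def split_cell_string(cell):
--     """
--     Split a cell specifier into its letters and numbers.
--
--     This uses letters from the whole string, rather than only from the start,
--     so cells must be specified correctly.
--
--     This function also takes care of case-insensitivity - upper and lower case
--     letters refer to the same column in spreadsheets so we should do the same
--     here.
--     """
--     letters = ''
--     numbers = ''
--     for char in cell:
--         if char.isalpha():
--             letters += char
--         elif char.isdigit():
--             numbers += char
--         else:
--             raise ValueError('Found a non-alphanumeric character in cell specifier')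
--     return (letters.upper(), numbers)
-- ===== SOURCE B (Python) =====
-- def split_cell_string(cell):
--     for c in cell:
--         if not (c.isalpha() or c.isdigit()):
--             raise ValueError('Found a non-alphanumeric character in cell specifier')
--     letters = ''.join(c for c in cell if c.isalpha()).upper()
--     numbers = ''.join(c for c in cell if c.isdigit())
--     return (letters, numbers)
-- ===== Notes on version B (the rewrite author's own statement) =====
-- stated objective: simpler
-- what changed: A's single loop that accumulates both strings by repeated concatenation is replaced by a validate-then-filter decomposition: one validation pass that raises on any non-alphanumeric character, then letters and numbers built as two separate filter/join passes.
import Mathlib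
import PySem

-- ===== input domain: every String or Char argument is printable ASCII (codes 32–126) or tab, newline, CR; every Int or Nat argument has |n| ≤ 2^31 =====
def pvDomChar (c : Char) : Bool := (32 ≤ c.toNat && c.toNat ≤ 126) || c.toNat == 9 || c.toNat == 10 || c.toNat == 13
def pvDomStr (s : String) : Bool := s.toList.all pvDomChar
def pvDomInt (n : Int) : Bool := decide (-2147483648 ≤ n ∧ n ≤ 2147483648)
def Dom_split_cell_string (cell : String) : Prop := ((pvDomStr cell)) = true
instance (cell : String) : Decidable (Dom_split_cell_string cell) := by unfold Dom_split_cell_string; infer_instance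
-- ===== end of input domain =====

-- B replaces A's single accumulating loop by a validate-then-filter decomposition (same O-cost, plainer).
-- Both programs raise ValueError on any non-alphanumeric character; Pre_ excludes exactly those inputs.

-- ===== PORT A =====
-- A's loop over cell with accumulators (letters, numbers); the 'else: raise' branch is 'none'.
def splitLoopA : List Char → Option (List Char × List Char) → Option (List Char × List Char)
  | _, none => none
  | [], some st => some st
  | c :: rest, some (ls, ns) =>
    if PySem.Chars.isalpha c then splitLoopA rest (some (ls ++ [c], ns))
    else if PySem.Chars.isdigit c then splitLoopA rest (some (ls, ns ++ [c]))
    else none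

def split_cell_string (cell : String) : String × String :=
  match splitLoopA cell.toList (some ([], [])) with
  | some (ls, ns) => (String.ofList (PySem.Chars.upper ls), String.ofList ns)
  | none => ("", "")   -- unreachable under Pre_ (Python raises ValueError here)

-- ===== PORT B =====
-- B: one validation pass, then two filter passes.
def split_cell_string_alt (cell : String) : String × String :=
  if cell.toList.all (fun c => PySem.Chars.isalpha c || PySem.Chars.isdigit c) then
    (String.ofList (PySem.Chars.upper (cell.toList.filter (fun c => PySem.Chars.isalpha c))),
     String.ofList (cell.toList.filter (fun c => PySem.Chars.isdigit c)))
  else ("", "")   -- unreachable under Pre_ (Python raises ValueError here)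

-- ===== PRECONDITION & SPEC =====
-- Pre_: every character is alphabetic or a digit; on any other character both Pythons raise ValueError.
def Pre_split_cell_string (cell : String) : Prop :=
  cell.toList.all (fun c => PySem.Chars.isalpha c || PySem.Chars.isdigit c) = true
instance (cell : String) : Decidable (Pre_split_cell_string cell) := by unfold Pre_split_cell_string; infer_instance
def pvWitness_split_cell_string : String := "aB12"

def Spec_split_cell_string (cell : String) (out : String × String) : Prop := out = split_cell_string_alt cell
instance (cell : String) (out : String × String) : Decidable (Spec_split_cell_string cell out) := by unfold Spec_split_cell_string; infer_instance

-- ===== CLAIM (what is proved, stated in full; the proofs are below) =====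
def Claim_equal_split_cell_string : Prop := ∀ (cell : String), Dom_split_cell_string cell → Pre_split_cell_string cell → Spec_split_cell_string cell (split_cell_string cell)

-- ===== LEMMAS AND PROOFS =====
lemma splitLoopA_valid (l : List Char) (ls ns : List Char)
    (h : ∀ c ∈ l, PySem.Chars.isalpha c || PySem.Chars.isdigit c) :
    splitLoopA l (some (ls, ns))
      = some (ls ++ l.filter (fun c => PySem.Chars.isalpha c),
              ns ++ l.filter (fun c => PySem.Chars.isdigit c)) := by
  induction l generalizing ls ns with
  | nil => simp [splitLoopA]
  | cons c rest ih =>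
    have hc := h c (by simp)
    have hrest : ∀ x ∈ rest, PySem.Chars.isalpha x || PySem.Chars.isdigit x :=
      fun x hx => h x (by simp [hx])
    by_cases ha : PySem.Chars.isalpha c = true
    · have hd : PySem.Chars.isdigit c = false := by
        -- no char is both alphabetic and a digit (the alpha ranges sit above '9')
        revert ha
        simp only [PySem.Chars.isalpha, PySem.Chars.isdigit, PySem.Chars.isupper,
          PySem.Chars.islower, Bool.or_eq_true, Bool.and_eq_true, decide_eq_true_eq,
          Char.le_def, UInt32.le_iff_toNat_le, Bool.and_eq_false_iff, decide_eq_false_iff_not]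
        have hA : ('A' : Char).val.toNat = 65 := rfl
        have hb : ('a' : Char).val.toNat = 97 := rfl
        have h9 : ('9' : Char).val.toNat = 57 := rfl
        intro hcase
        right
        omega
      simp [splitLoopA, ha, hd, ih _ _ hrest]
    · have hd : PySem.Chars.isdigit c = true := by
        rcases Bool.or_eq_true_iff.mp hc with h1 | h1
        · exact absurd h1 ha
        · exact h1
      simp [splitLoopA, ha, hd, ih _ _ hrest]

-- ===== VERDICT (by name: the statement is the Claim_ definition above) =====
theorem split_cell_string_spec : Claim_equal_split_cell_string := by
  intro cell _ hpre
  unfold Spec_split_cell_string split_cell_string split_cell_string_alt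
  have h : ∀ c ∈ cell.toList, PySem.Chars.isalpha c || PySem.Chars.isdigit c := by
    simpa [Pre_split_cell_string, List.all_eq_true] using hpre
  rw [splitLoopA_valid cell.toList [] [] h]
  simp [List.all_eq_true.mpr h]
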